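-- pv_equiv track=rewrite | github.com/cthacker-udel/AI_Projects | csp/helpers.py | does_diagonal_hit
-- ===== SOURCE A (Python) =====
-- def does_diagonal_hit(row: int, col: int, source_row: int, source_col: int, down: bool = False, left: bool = False) -> bool:
--     tmp_row = row
--     tmp_col = col
--     while row != source_row and row > 0:
--         if row < source_row:
--             row += 1
--         else:
--             row -= 1
--         tmp_row += (1 if down else -1)
--         tmp_col += (-1 if left else 1)
--     return tmp_row == row and tmp_col == source_col
-- ===== SOURCE B (Python) =====
-- def does_diagonal_hit(row: int, col: int, source_row: int, source_col: int, down: bool = False, left: bool = False) -> bool: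
--     # closed form: number of loop steps and the loop's final row, computed directly
--     if row <= 0 or row == source_row:
--         n, final = 0, row
--     elif row < source_row:
--         n, final = source_row - row, source_row
--     else:
--         final = source_row if source_row > 0 else 0
--         n = row - final
--     return row + n * (1 if down else -1) == final and col + n * (-1 if left else 1) == source_col
-- ===== Notes on version B (the rewrite author's own statement) =====
-- stated objective: faster
-- what changed: Replaces the step-by-step while loop with closed-form arithmetic computing the step count and the loop's final row directly.
import Mathlib
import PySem

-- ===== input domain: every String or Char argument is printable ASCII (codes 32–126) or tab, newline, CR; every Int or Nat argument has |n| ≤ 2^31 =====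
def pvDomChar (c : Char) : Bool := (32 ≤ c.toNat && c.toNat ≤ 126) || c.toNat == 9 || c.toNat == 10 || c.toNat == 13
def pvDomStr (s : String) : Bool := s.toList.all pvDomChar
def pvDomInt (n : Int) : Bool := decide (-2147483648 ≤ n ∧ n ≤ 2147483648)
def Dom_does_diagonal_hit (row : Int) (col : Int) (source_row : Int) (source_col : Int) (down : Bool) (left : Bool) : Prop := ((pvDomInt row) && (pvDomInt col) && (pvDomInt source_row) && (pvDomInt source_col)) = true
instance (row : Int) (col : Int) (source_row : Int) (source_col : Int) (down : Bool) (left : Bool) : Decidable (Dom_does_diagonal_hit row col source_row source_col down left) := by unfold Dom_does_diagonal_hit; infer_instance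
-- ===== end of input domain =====

-- B replaces A's step-by-step walk with closed-form arithmetic (step count and final row computed directly).

-- ===== PORT A =====
-- B replaces A's step-by-step walk with closed-form arithmetic (step count and final row computed directly).
-- exact number of iterations of A's while loop, used only as structural fuel for the port's recursion
def pvMeasure (row : Int) (source_row : Int) : Nat :=
  (if row = source_row ∨ row ≤ 0 then 0
   else if row < source_row then source_row - row
   else row - max source_row 0).toNat

-- literal transliteration of A's while loop; state (row, tmp_row, tmp_col); fuel only makes it total
def pvLoopA (fuel : Nat) (row : Int) (source_row : Int) (tmp_row : Int) (tmp_col : Int) (down : Bool) (left : Bool) : Int × Int × Int :=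
  match fuel with
  | 0 => (row, tmp_row, tmp_col)
  | n + 1 =>
    if row ≠ source_row ∧ row > 0 then
      pvLoopA n (if row < source_row then row + 1 else row - 1) source_row
        (tmp_row + (if down then 1 else -1)) (tmp_col + (if left then -1 else 1)) down left
    else (row, tmp_row, tmp_col)

def does_diagonal_hit (row : Int) (col : Int) (source_row : Int) (source_col : Int) (down : Bool) (left : Bool) : Bool :=
  let r := pvLoopA (pvMeasure row source_row) row source_row row col down left
  decide (r.2.1 = r.1 ∧ r.2.2 = source_col)

-- ===== PORT B =====
def does_diagonal_hit_alt (row : Int) (col : Int) (source_row : Int) (source_col : Int) (down : Bool) (left : Bool) : Bool :=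
  let p : Int × Int :=
    if row ≤ 0 ∨ row = source_row then (0, row)
    else if row < source_row then (source_row - row, source_row)
    else
      let f := if source_row > 0 then source_row else 0
      (row - f, f)
  decide (row + p.1 * (if down then 1 else -1) = p.2 ∧ col + p.1 * (if left then -1 else 1) = source_col)

-- ===== PRECONDITION & SPEC =====
def Spec_does_diagonal_hit (row : Int) (col : Int) (source_row : Int) (source_col : Int) (down : Bool) (left : Bool) (out : Bool) : Prop := out = does_diagonal_hit_alt row col source_row source_col down left
instance (row : Int) (col : Int) (source_row : Int) (source_col : Int) (down : Bool) (left : Bool) (out : Bool) : Decidable (Spec_does_diagonal_hit row col source_row source_col down left out) := by unfold Spec_does_diagonal_hit; infer_instance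

-- ===== CLAIM (what is proved, stated in full; the proofs are below) =====
def Claim_equal_does_diagonal_hit : Prop := ∀ (row : Int) (col : Int) (source_row : Int) (source_col : Int) (down : Bool) (left : Bool), Dom_does_diagonal_hit row col source_row source_col down left → Spec_does_diagonal_hit row col source_row source_col down left (does_diagonal_hit row col source_row source_col down left)

-- ===== LEMMAS AND PROOFS =====
-- closed-form step count and final row of A's loop
def pvSteps (row source_row : Int) : Int :=
  if row ≤ 0 ∨ row = source_row then 0
  else if row < source_row then source_row - row
  else row - (if source_row > 0 then source_row else 0)

def pvFinal (row source_row : Int) : Int :=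
  if row ≤ 0 ∨ row = source_row then row
  else if row < source_row then source_row
  else if source_row > 0 then source_row else 0

theorem pvLoopA_eq (n : Nat) (row source_row tmp_row tmp_col : Int) (down left : Bool)
    (hn : (n : Int) = pvSteps row source_row) :
    pvLoopA n row source_row tmp_row tmp_col down left =
      (pvFinal row source_row,
       tmp_row + pvSteps row source_row * (if down then 1 else -1),
       tmp_col + pvSteps row source_row * (if left then -1 else 1)) := by
  induction n generalizing row tmp_row tmp_col with
  | zero =>
    have h0 : pvSteps row source_row = 0 := by omega
    have hf : pvFinal row source_row = row := by
      unfold pvSteps at h0; unfold pvFinal; split_ifs at h0 ⊢ <;> omega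
    rw [pvLoopA, h0, hf]; simp
  | succ n ih =>
    have hcond : row ≠ source_row ∧ row > 0 := by
      by_contra hc
      have : pvSteps row source_row = 0 := by unfold pvSteps; split_ifs <;> omega
      omega
    have hs : pvSteps row source_row =
        pvSteps (if row < source_row then row + 1 else row - 1) source_row + 1 := by
      unfold pvSteps; split_ifs <;> omega
    have hf : pvFinal (if row < source_row then row + 1 else row - 1) source_row =
        pvFinal row source_row := by
      unfold pvFinal; split_ifs <;> omega
    rw [pvLoopA, if_pos hcond, ih _ _ _ (by omega)]
    rw [hf, hs]
    simp only [Prod.mk.injEq]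
    refine ⟨trivial, ?_, ?_⟩ <;> cases down <;> cases left <;> simp <;> ring

theorem pvMeasure_eq_steps (row source_row : Int) :
    (pvMeasure row source_row : Int) = pvSteps row source_row := by
  unfold pvMeasure pvSteps; split_ifs <;> omega

-- ===== VERDICT (by name: the statement is the Claim_ definition above) =====
theorem does_diagonal_hit_spec : Claim_equal_does_diagonal_hit := by
  intro row col source_row source_col down left _
  unfold Spec_does_diagonal_hit does_diagonal_hit does_diagonal_hit_alt
  rw [pvLoopA_eq _ _ _ _ _ _ _ (pvMeasure_eq_steps row source_row)]
  apply decide_eq_decide.mpr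
  unfold pvSteps pvFinal
  split_ifs <;> simp <;> omega
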